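-- pv_equiv track=rewrite | github.com/yejin7211/Algorithm | 백준/Gold/2143. 두 배열의 합/두 배열의 합.py | make_sum_arr
-- ===== SOURCE A (Python) =====
-- def make_sum_arr(arr):
--     sum_arr = []
--     for i in range(len(arr)):
--         total = 0
--         for j in range(i, len(arr)):
--             total += arr[j]
--             sum_arr.append(total)
--     return sum_arr
-- ===== SOURCE B (Python) =====
-- def make_sum_arr(arr):
--     prefix = [0]
--     for x in arr:
--         prefix.append(prefix[-1] + x)
--     out = []
--     for i in range(len(arr)):
--         for j in range(i, len(arr)):
--             out.append(prefix[j + 1] - prefix[i])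
--     return out
-- ===== Notes on version B (the rewrite author's own statement) =====
-- stated objective: alternative
-- what changed: B precomputes a prefix-sum table once and emits each subarray sum as a table subtraction prefix[j+1]-prefix[i], eliminating A's inner running accumulator.
import Mathlib
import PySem

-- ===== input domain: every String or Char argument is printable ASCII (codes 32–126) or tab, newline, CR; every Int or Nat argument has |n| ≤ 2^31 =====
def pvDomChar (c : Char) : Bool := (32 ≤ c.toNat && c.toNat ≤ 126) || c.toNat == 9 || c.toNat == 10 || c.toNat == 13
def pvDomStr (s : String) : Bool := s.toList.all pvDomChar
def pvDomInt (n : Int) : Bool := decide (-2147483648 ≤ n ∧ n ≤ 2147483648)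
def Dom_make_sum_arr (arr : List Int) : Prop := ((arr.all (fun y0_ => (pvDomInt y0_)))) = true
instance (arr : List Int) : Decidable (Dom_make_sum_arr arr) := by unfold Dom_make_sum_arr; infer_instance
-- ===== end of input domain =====

-- B replaces A's inner running accumulator by a prefix-sum table consulted by subtraction (objective: alternative decomposition, same cost).

-- ===== PORT A =====
-- for i in range(len(arr)): total = 0; for j in range(i, len(arr)): total += arr[j]; sum_arr.append(total)
def make_sum_arr (arr : List Int) : List Int :=
  (List.range arr.length).foldl
    (fun sum_arr i =>
      ((List.range' i (arr.length - i)).foldl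
        (fun (st : List Int × Int) j =>
          let total := st.2 + arr.getD j 0
          (st.1 ++ [total], total))
        (sum_arr, 0)).1)
    []

-- ===== PORT B =====
-- prefix = [0]; for x in arr: prefix.append(prefix[-1] + x)
-- then out.append(prefix[j+1] - prefix[i]) for each i, j
def make_sum_arr_alt (arr : List Int) : List Int :=
  let pre := arr.foldl (fun p x => p ++ [p.getLastD 0 + x]) [0]
  (List.range arr.length).foldl
    (fun out i =>
      (List.range' i (arr.length - i)).foldl
        (fun out j => out ++ [pre.getD (j + 1) 0 - pre.getD i 0])
        out)
    []

-- ===== PRECONDITION & SPEC =====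
def Spec_make_sum_arr (arr : List Int) (out : List Int) : Prop := out = make_sum_arr_alt arr
instance (arr : List Int) (out : List Int) : Decidable (Spec_make_sum_arr arr out) := by unfold Spec_make_sum_arr; infer_instance

-- ===== CLAIM (what is proved, stated in full; the proofs are below) =====
def Claim_equal_make_sum_arr : Prop := ∀ (arr : List Int), Dom_make_sum_arr arr → Spec_make_sum_arr arr (make_sum_arr arr)

-- ===== LEMMAS AND PROOFS =====

-- the prefix-building loop, fully characterised
theorem prefix_aux (l : List Int) : ∀ (p : List Int) (c : Int), p.getLastD 0 = c →
    l.foldl (fun p x => p ++ [p.getLastD 0 + x]) p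
      = p ++ (List.range l.length).map (fun k => c + (l.take (k + 1)).sum) := by
  induction l with
  | nil => intro p c _; simp
  | cons a t ih =>
    intro p c hc
    have h1 : (p ++ [c + a]).getLastD 0 = c + a := by simp
    simp only [List.foldl_cons, hc, ih (p ++ [c + a]) (c + a) h1]
    rw [List.append_assoc]
    congr 1
    rw [List.length_cons, List.range_succ_eq_map, List.map_cons, List.map_map,
      List.singleton_append]
    congr 1
    · simp
    · simp only [List.map_inj_left, Function.comp, List.take_succ_cons, List.sum_cons]
      intro k _
      ring

theorem prefix_eq (arr : List Int) :
    arr.foldl (fun p x => p ++ [p.getLastD 0 + x]) [0]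
      = (List.range (arr.length + 1)).map (fun k => (arr.take k).sum) := by
  rw [prefix_aux arr [0] 0 (by simp)]
  rw [List.range_succ_eq_map]
  simp [List.map_map, Function.comp]

theorem prefix_getD (arr : List Int) (k : Nat) (hk : k ≤ arr.length) :
    (arr.foldl (fun p x => p ++ [p.getLastD 0 + x]) [0]).getD k 0 = (arr.take k).sum := by
  rw [prefix_eq]
  rw [List.getD_eq_getElem?_getD]
  simp [Nat.lt_succ_of_le hk]

theorem elem_eq_take (arr : List Int) (j : Nat) (hj : j < arr.length) :
    arr.getD j 0 = (arr.take (j + 1)).sum - (arr.take j).sum := by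
  have h2 : arr.take (j + 1) = arr.take j ++ [arr[j]] := by
    rw [List.take_add_one]; simp [List.getElem?_eq_getElem hj]
  rw [h2, List.sum_append, List.getD_eq_getElem?_getD, List.getElem?_eq_getElem hj]
  simp

-- A's inner loop: running total = prefix difference
theorem innerA (arr : List Int) : ∀ (m i : Nat) (acc : List Int) (t : Int), i + m ≤ arr.length →
    (List.range' i m).foldl
        (fun (st : List Int × Int) j =>
          let total := st.2 + arr.getD j 0
          (st.1 ++ [total], total))
        (acc, t)
      = (acc ++ (List.range' i m).map (fun j => t + ((arr.take (j + 1)).sum - (arr.take i).sum)),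
         t + ((arr.take (i + m)).sum - (arr.take i).sum)) := by
  intro m
  induction m with
  | zero => intro i acc t _; simp
  | succ m ih =>
    intro i acc t h
    have hi : i < arr.length := by omega
    have ht : t + arr.getD i 0 = t + ((arr.take (i + 1)).sum - (arr.take i).sum) := by
      rw [elem_eq_take arr i hi]
    rw [List.range'_succ, List.foldl_cons]
    simp only []
    rw [ih (i + 1) (acc ++ [t + arr.getD i 0]) (t + arr.getD i 0) (by omega)]
    have hmap : List.map (fun j => t + ((arr.take (i + 1)).sum - (arr.take i).sum)
          + ((arr.take (j + 1)).sum - (arr.take (i + 1)).sum)) (List.range' (i + 1) m)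
        = List.map (fun j => t + ((arr.take (j + 1)).sum - (arr.take i).sum))
            (List.range' (i + 1) m) :=
      List.map_congr_left (fun j _ => by ring)
    rw [Prod.mk.injEq]
    refine ⟨?_, ?_⟩
    · rw [List.append_assoc, List.singleton_append, List.map_cons, ht, hmap]
    · rw [ht, show i + 1 + m = i + (m + 1) by omega]; ring

theorem make_sum_arr_spec_aux (arr : List Int) : make_sum_arr arr = make_sum_arr_alt arr := by
  unfold make_sum_arr make_sum_arr_alt
  simp only []
  apply List.foldl_ext
  intro acc i hi
  have hi' : i < arr.length := List.mem_range.mp hi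
  rw [innerA arr (arr.length - i) i acc 0 (by omega)]
  simp only []
  rw [PySem.List.foldl_append_singleton_eq_map]
  congr 1
  apply List.map_congr_left
  intro j hj
  have hj' : i ≤ j ∧ j < i + (arr.length - i) := by
    have := List.mem_range'_1.mp hj; omega
  rw [prefix_getD arr (j + 1) (by omega), prefix_getD arr i (by omega)]
  ring

-- ===== VERDICT (by name: the statement is the Claim_ definition above) =====
theorem make_sum_arr_spec : Claim_equal_make_sum_arr := by
  intro arr _
  unfold Spec_make_sum_arr
  exact make_sum_arr_spec_aux arr
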